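-- pv_equiv track=rewrite | github.com/mnaberez/vwradio | avr_radio/host/vwradio/decode.py | _draw_chars
-- ===== SOURCE A (Python) =====
-- def _draw_chars(data, addresses):
--     heading = ''.join(['0x%02x:  ' % a for a in addresses])
--     lines = [heading]
--
--     for row in range(7):
--         line = ''
--         for charnum in range(len(addresses)):
--             byte = data[(charnum * 7) + row]
--             line += (format(byte, '#010b')[5:].
--                       replace('0', u'·').replace('1', u'▊') + '  ')
--         lines.append(line)
--     return lines
-- ===== SOURCE B (Python) =====
-- def _cell(byte):
--     return format(byte, '#010b')[5:].replace('0', u'\u00b7').replace('1', u'\u258a') + '  '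
--
--
-- def _draw_chars(data, addresses):
--     heading = ''.join(['0x%02x:  ' % a for a in addresses])
--     columns = [[_cell(data[charnum * 7 + row]) for row in range(7)]
--                for charnum in range(len(addresses))]
--     rows = [''.join([col[row] for col in columns]) for row in range(7)]
--     return [heading] + rows
-- ===== Notes on version B (the rewrite author's own statement) =====
-- stated objective: alternative
-- what changed: B inverts the loop nesting: it builds a 7-segment glyph column per character first, then assembles the 7 output rows by transposing the column table, instead of A's row-outer loop that indexes byte-by-byte while emitting each line directly.
import Mathlib
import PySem

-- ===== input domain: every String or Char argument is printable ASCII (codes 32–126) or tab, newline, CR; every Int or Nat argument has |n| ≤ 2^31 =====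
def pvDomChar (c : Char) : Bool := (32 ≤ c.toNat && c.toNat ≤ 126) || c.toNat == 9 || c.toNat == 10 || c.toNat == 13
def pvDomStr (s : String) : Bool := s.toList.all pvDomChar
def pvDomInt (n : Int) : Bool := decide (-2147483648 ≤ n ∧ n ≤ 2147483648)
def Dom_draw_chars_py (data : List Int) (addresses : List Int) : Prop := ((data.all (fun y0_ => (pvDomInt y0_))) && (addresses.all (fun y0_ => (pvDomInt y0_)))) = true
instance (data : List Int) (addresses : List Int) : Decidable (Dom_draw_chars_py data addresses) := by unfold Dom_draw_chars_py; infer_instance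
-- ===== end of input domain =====

-- B builds a 7-segment glyph per character and transposes, instead of A's row-outer
-- direct emission; same return value on Pre_ (data long enough for every index).

-- ===== PORT A =====
-- hand port of "'%02x' % a": lowercase hex of |a|, zero-padded to total width 2, sign in
-- front (exact for all ints: CPython pads to the TOTAL width including the '-').
def pvHex2 (a : Int) : List Char :=
  let sign : List Char := if a < 0 then ['-'] else []
  let digits := Nat.toDigits 16 a.natAbs
  sign ++ List.replicate (2 - (sign.length + digits.length)) '0' ++ digits

-- "'0x%02x:  ' % a"
def pvHeadCell (a : Int) : String := String.ofList ('0' :: 'x' :: pvHex2 a ++ [':', ' ', ' '])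

-- hand port of "format(byte, '#010b')": sign, then '0b', then the binary digits of |byte|
-- zero-padded so the whole string (sign included) has width ≥ 10 (exact, no truncation).
def pvFmtHashB10 (b : Int) : List Char :=
  let sign : List Char := if b < 0 then ['-'] else []
  let digits := Nat.toDigits 2 b.natAbs
  sign ++ '0' :: 'b' :: (List.replicate (10 - (sign.length + 2 + digits.length)) '0' ++ digits)

-- "format(byte, '#010b')[5:].replace('0', '·').replace('1', '▊') + '  '"
def pvCell (b : Int) : String :=
  String.ofList (PySem.Chars.replace (PySem.Chars.replace
      (PySem.List.slice (pvFmtHashB10 b) (some 5) none) ['0'] ['·']) ['1'] ['▊'] ++ [' ', ' '])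

def draw_chars_py (data : List Int) (addresses : List Int) : List String :=
  let heading := PySem.Str.join "" (addresses.map pvHeadCell)
  (PySem.List.pyRange 0 7 1).foldl
    (fun lines row =>
      lines ++ [(PySem.List.pyRange 0 (addresses.length : Int) 1).foldl
        (fun line charnum =>
          let byte := PySem.List.pyGetD data (charnum * 7 + row) 0
          line ++ pvCell byte) ""])
    [heading]

-- ===== PORT B =====
def draw_chars_py_alt (data : List Int) (addresses : List Int) : List String :=
  let heading := PySem.Str.join "" (addresses.map pvHeadCell)
  let columns := (PySem.List.pyRange 0 (addresses.length : Int) 1).map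
    (fun charnum => (PySem.List.pyRange 0 7 1).map
      (fun row => pvCell (PySem.List.pyGetD data (charnum * 7 + row) 0)))
  let rows := (PySem.List.pyRange 0 7 1).map
    (fun row => PySem.Str.join "" (columns.map (fun col => PySem.List.pyGetD col row "")))
  [heading] ++ rows

-- ===== PRECONDITION & SPEC =====
-- A raises IndexError iff some index charnum*7+row reaches past data; all indices are
-- in range exactly when data holds the full 7 cells per address.
def Pre_draw_chars_py (data : List Int) (addresses : List Int) : Prop :=
  7 * addresses.length ≤ data.length
instance (data : List Int) (addresses : List Int) : Decidable (Pre_draw_chars_py data addresses) := by unfold Pre_draw_chars_py; infer_instance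

def pvWitness_draw_chars_py : List Int × List Int := ([1, 2, 3, 4, 5, 6, 7], [0])

def Spec_draw_chars_py (data : List Int) (addresses : List Int) (out : List String) : Prop := out = draw_chars_py_alt data addresses
instance (data : List Int) (addresses : List Int) (out : List String) : Decidable (Spec_draw_chars_py data addresses out) := by unfold Spec_draw_chars_py; infer_instance

-- ===== CLAIM (what is proved, stated in full; the proofs are below) =====
def Claim_equal_draw_chars_py : Prop := ∀ (data : List Int) (addresses : List Int), Dom_draw_chars_py data addresses → Pre_draw_chars_py data addresses → Spec_draw_chars_py data addresses (draw_chars_py data addresses)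

-- ===== LEMMAS AND PROOFS =====

lemma pvJoinNilFlatten (xs : List (List Char)) : PySem.Chars.join [] xs = xs.flatten := by
  induction xs with
  | nil => simp [PySem.Chars.join, List.intercalate]
  | cons x t ih =>
    cases t with
    | nil => simp [PySem.Chars.join, List.intercalate]
    | cons y ys => rw [PySem.Chars.join_cons_cons, ih]; simp

lemma pvStrJoinCons (x : String) (xs : List String) :
    PySem.Str.join "" (x :: xs) = x ++ PySem.Str.join "" xs := by
  simp [PySem.Str.join, pvJoinNilFlatten]

lemma pvStrJoinNil : PySem.Str.join "" ([] : List String) = "" := by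
  simp [PySem.Str.join]

-- the '+='-loop over any list equals ''.join of the mapped list
lemma pvFoldlAppendJoin {α : Type} (g : α → String) (l : List α) :
    ∀ s : String, l.foldl (fun acc x => acc ++ g x) s = s ++ PySem.Str.join "" (l.map g) := by
  induction l with
  | nil => intro s; simp [pvStrJoinNil]
  | cons x t ih =>
    intro s
    simp only [List.foldl_cons, List.map_cons, pvStrJoinCons, ih]
    simp [String.append_assoc]

lemma pvRowEq (data : List Int) (addresses : List Int) (r : Int) (h0 : 0 ≤ r) (h7 : r < 7) :
    (PySem.List.pyRange 0 (addresses.length : Int) 1).foldl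
      (fun line charnum =>
        line ++ pvCell (PySem.List.pyGetD data (charnum * 7 + r) 0)) ""
    = PySem.Str.join ""
        (((PySem.List.pyRange 0 (addresses.length : Int) 1).map
          (fun charnum => (PySem.List.pyRange 0 7 1).map
            (fun row => pvCell (PySem.List.pyGetD data (charnum * 7 + row) 0)))).map
          (fun col => PySem.List.pyGetD col r "")) := by
  rw [pvFoldlAppendJoin]
  rw [List.map_map]
  have hc : ((fun col => PySem.List.pyGetD col r "") ∘
      (fun charnum => (PySem.List.pyRange 0 7 1).map
        (fun row => pvCell (PySem.List.pyGetD data (charnum * 7 + row) 0)))) =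
      (fun charnum => pvCell (PySem.List.pyGetD data (charnum * 7 + r) 0)) := by
    funext c
    simp only [Function.comp]
    rw [PySem.List.pyGetD_map_pyRange_of_nonneg _ 7 r _ h0 h7]
  rw [hc]
  simp

-- ===== VERDICT (by name: the statement is the Claim_ definition above) =====
theorem draw_chars_py_spec : Claim_equal_draw_chars_py := by
  intro data addresses _ _
  unfold Spec_draw_chars_py
  have h7 : PySem.List.pyRange 0 7 1 = [0, 1, 2, 3, 4, 5, 6] := by decide
  simp only [draw_chars_py, draw_chars_py_alt]
  rw [h7]
  simp only [List.foldl_cons, List.foldl_nil, List.map_cons, List.map_nil,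
    List.cons_append, List.nil_append, List.cons.injEq]
  refine ⟨trivial, ?_, ?_, ?_, ?_, ?_, ?_, ?_, trivial⟩ <;>
    exact pvRowEq data addresses _ (by norm_num) (by norm_num)
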